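-- pv_equiv track=rewrite | github.com/Flecart/chess-software-engineering | code/bot/bot/display_board.py | _to_standard_fen
-- ===== SOURCE A (Python) =====
-- def _to_standard_fen(fen):
--     fen = fen.split(" ")
--     count_empty_cell = 0
--     new_fen = ""
--     # we transform the first part of fen that contains ? to a normal fen
--     for i in range(len(fen[0])):
--         if fen[0][i] == "/":
--             if count_empty_cell > 0:
--                 new_fen += str(count_empty_cell)
--             new_fen += "/"
--             count_empty_cell = 0
--         elif fen[0][i] == "?":
--             count_empty_cell += 1
--         elif fen[0][i].isdigit():
--             count_empty_cell += int(fen[0][i])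
--         else:
--             if count_empty_cell > 0:
--                 new_fen += str(count_empty_cell)
--             new_fen += fen[0][i]
--             count_empty_cell = 0
--     if count_empty_cell > 0:
--         new_fen += str(count_empty_cell)
--
--     return " ".join([new_fen] + fen[1:])
-- ===== SOURCE B (Python) =====
-- def _to_standard_fen(fen):
--     fields = fen.split(" ")
--     # Stage 1: normalize the board field to unary form -- every digit d
--     # becomes d '?' marks, so empties are uniformly represented by '?'.
--     expanded = "".join("?" * int(c) if c.isdigit() else c for c in fields[0])
--     # Stage 2: run-length encode maximal '?' runs with a two-pointer scan.
--     out = []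
--     i = 0
--     n = len(expanded)
--     while i < n:
--         if expanded[i] == "?":
--             j = i
--             while j < n and expanded[j] == "?":
--                 j += 1
--             out.append(str(j - i))
--             i = j
--         else:
--             out.append(expanded[i])
--             i += 1
--     return " ".join(["".join(out)] + fields[1:])
-- ===== Notes on version B (the rewrite author's own statement) =====
-- stated objective: alternative
-- what changed: B replaces A's single-pass counter machine (an integer empty-cell count threaded through a four-way branch with flush points) by two independent stages: first normalize the board field to unary by expanding every digit d into d '?' marks, then run-length encode the maximal '?' runs with a two-pointer scan.
import Mathlib
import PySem

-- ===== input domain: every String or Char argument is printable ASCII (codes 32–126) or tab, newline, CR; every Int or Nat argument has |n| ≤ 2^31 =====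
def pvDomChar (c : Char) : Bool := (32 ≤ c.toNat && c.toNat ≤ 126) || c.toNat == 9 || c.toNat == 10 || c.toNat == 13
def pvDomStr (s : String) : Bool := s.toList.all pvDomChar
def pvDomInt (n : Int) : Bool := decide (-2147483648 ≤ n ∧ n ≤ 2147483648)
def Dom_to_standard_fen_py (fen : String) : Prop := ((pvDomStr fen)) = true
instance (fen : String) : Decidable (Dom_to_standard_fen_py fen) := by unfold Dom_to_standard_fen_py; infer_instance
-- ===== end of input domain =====

-- B is a two-stage alternative: it first normalizes the board field to unary form (each digit d
-- becomes d '?' marks) and then run-length encodes the maximal '?' runs, instead of A's single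
-- pass that threads an integer empty-cell counter with flush points through a four-way branch.

-- ===== PORT A =====
-- str(count_empty_cell) emitted only when count > 0
def pvFlush (cnt : Int) : List Char := if cnt > 0 then PySem.Int.toChars cnt else []

-- one iteration of A's for-loop; state = (count_empty_cell, new_fen)
def pvStepA (st : Int × List Char) (c : Char) : Int × List Char :=
  if c == '/' then (0, st.2 ++ pvFlush st.1 ++ ['/'])
  else if c == '?' then (st.1 + 1, st.2)
  else if PySem.Chars.isdigit c then (st.1 + (PySem.Int.ofChars? [c]).getD 0, st.2)
  else (0, st.2 ++ pvFlush st.1 ++ [c])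

def to_standard_fen_py (fen : String) : String :=
  let parts := PySem.Chars.splitOn fen.toList [' ']
  let st := (parts.headD []).foldl pvStepA (0, [])
  let new_fen := st.2 ++ pvFlush st.1
  String.ofList (PySem.Chars.join [' '] (new_fen :: parts.tail))

-- ===== PORT B =====
-- stage 1: '"?" * int(c) if c.isdigit() else c' joined over the board field
def pvExpand (cs : List Char) : List Char :=
  cs.flatMap (fun c =>
    if PySem.Chars.isdigit c then List.replicate ((PySem.Int.ofChars? [c]).getD 0).toNat '?'
    else [c])

-- stage 2: the two-pointer while-loop; the inner 'j' scan is the takeWhile span of the '?' run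
def pvCompress : List Char → List Char
  | [] => []
  | c :: rest =>
    if c = '?' then
      PySem.Int.toChars (1 + (rest.takeWhile (· == '?')).length) ++
        pvCompress (rest.dropWhile (· == '?'))
    else c :: pvCompress rest
  termination_by l => l.length
  decreasing_by
    · have := List.length_dropWhile_le (· == '?') rest; simp; omega
    · simp

def to_standard_fen_py_alt (fen : String) : String :=
  let fields := PySem.Chars.splitOn fen.toList [' ']
  let board := pvCompress (pvExpand (fields.headD []))
  String.ofList (PySem.Chars.join [' '] (board :: fields.tail))

-- ===== PRECONDITION & SPEC =====
def Spec_to_standard_fen_py (fen : String) (out : String) : Prop := out = to_standard_fen_py_alt fen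
instance (fen : String) (out : String) : Decidable (Spec_to_standard_fen_py fen out) := by unfold Spec_to_standard_fen_py; infer_instance

-- ===== CLAIM =====
def Claim_equal_to_standard_fen_py : Prop := ∀ (fen : String), Dom_to_standard_fen_py fen → Spec_to_standard_fen_py fen (to_standard_fen_py fen)

-- ===== LEMMAS AND PROOFS =====

-- recursive description of A's loop result
def pvG (cnt : Int) : List Char → List Char
  | [] => pvFlush cnt
  | c :: rest =>
    if c == '/' then pvFlush cnt ++ '/' :: pvG 0 rest
    else if c == '?' then pvG (cnt + 1) rest
    else if PySem.Chars.isdigit c then pvG (cnt + (PySem.Int.ofChars? [c]).getD 0) rest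
    else pvFlush cnt ++ c :: pvG 0 rest

theorem foldA_eq (cs : List Char) : ∀ (cnt : Int) (acc : List Char),
    (cs.foldl pvStepA (cnt, acc)).2 ++ pvFlush (cs.foldl pvStepA (cnt, acc)).1
      = acc ++ pvG cnt cs := by
  induction cs with
  | nil => intro cnt acc; simp [pvG]
  | cons c rest ih =>
    intro cnt acc
    simp only [List.foldl_cons, pvG, pvStepA]
    split_ifs <;> simp [ih]

theorem pvExpand_cons (c : Char) (t : List Char) :
    pvExpand (c :: t)
      = (if PySem.Chars.isdigit c then List.replicate ((PySem.Int.ofChars? [c]).getD 0).toNat '?'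
         else [c]) ++ pvExpand t := by
  simp [pvExpand]

theorem take_rep (m : Nat) (l : List Char) (h : l = [] ∨ ∃ c t, l = c :: t ∧ c ≠ '?') :
    (List.replicate m '?' ++ l).takeWhile (· == '?') = List.replicate m '?' ∧
    (List.replicate m '?' ++ l).dropWhile (· == '?') = l := by
  induction m with
  | zero =>
    rcases h with h | ⟨c, t, rfl, hc⟩
    · simp [h]
    · simp [hc]
  | succ n ih => simpa [List.replicate_succ, List.takeWhile, List.dropWhile] using ih

-- pvFlush with a Nat count
def pvFlushN (n : Nat) : List Char := if 0 < n then PySem.Int.toChars n else []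

theorem compress_rep_nil (n : Nat) :
    pvCompress (List.replicate n '?') = pvFlushN n := by
  cases n with
  | zero => simp [pvCompress, pvFlushN]
  | succ m =>
    rw [List.replicate_succ, pvCompress]
    rw [if_pos rfl]
    have hm := take_rep m [] (Or.inl rfl)
    simp only [List.append_nil] at hm
    rw [hm.1, hm.2, pvCompress]
    simp only [pvFlushN, if_pos (Nat.succ_pos m), List.length_replicate, List.append_nil]
    congr 1
    push_cast
    ring

theorem compress_rep_cons (n : Nat) (c : Char) (hc : c ≠ '?') (t : List Char) :
    pvCompress (List.replicate n '?' ++ c :: t) = pvFlushN n ++ c :: pvCompress t := by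
  cases n with
  | zero => simp [pvCompress, hc, pvFlushN]
  | succ m =>
    rw [List.replicate_succ, List.cons_append, pvCompress]
    rw [if_pos rfl]
    have hm := take_rep m (c :: t) (Or.inr ⟨c, t, rfl, hc⟩)
    rw [hm.1, hm.2, pvCompress, if_neg hc]
    simp only [pvFlushN, if_pos (Nat.succ_pos m), List.length_replicate]
    congr 2
    push_cast
    ring

theorem flush_toNat (cnt : Int) (h : 0 ≤ cnt) : pvFlushN cnt.toNat = pvFlush cnt := by
  simp only [pvFlushN, pvFlush]
  rcases lt_or_ge 0 cnt with h1 | h1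
  · rw [if_pos h1, if_pos (by omega)]
    congr 1
    omega
  · have : cnt = 0 := le_antisymm h1 h
    simp [this]

theorem digit_val_nonneg (c : Char) (h : PySem.Chars.isdigit c = true) :
    0 ≤ (PySem.Int.ofChars? [c]).getD 0 := by
  simp only [PySem.Chars.isdigit, Bool.and_eq_true, decide_eq_true_eq, Char.le_def] at h
  obtain ⟨h1, h2⟩ := h
  have hc : c = Char.ofNat c.toNat := by simp [Char.ofNat_toNat]
  have hlo : 48 ≤ c.toNat := h1
  have hhi : c.toNat ≤ 57 := h2
  rw [hc]
  interval_cases (c.toNat) <;> decide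

-- main bridge: A's loop from counter cnt equals B's compress over cnt unary marks plus the expansion
theorem pvG_eq (cs : List Char) : ∀ (cnt : Int), 0 ≤ cnt →
    pvG cnt cs = pvCompress (List.replicate cnt.toNat '?' ++ pvExpand cs) := by
  induction cs with
  | nil =>
    intro cnt h
    rw [pvG]
    simp only [pvExpand, List.flatMap_nil, List.append_nil]
    rw [compress_rep_nil, flush_toNat _ h]
  | cons c rest ih =>
    intro cnt h
    rw [pvG, pvExpand_cons]
    by_cases hs : c = '/'
    · subst hs
      have e1 : (('/':Char) == '/') = true := by decide
      have e2 : PySem.Chars.isdigit '/' = false := by decide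
      simp only [e1, e2, if_true, Bool.false_eq_true, if_false, List.singleton_append]
      rw [compress_rep_cons _ _ (by decide), flush_toNat _ h, ih 0 le_rfl]
      simp
    · have hsb : (c == '/') = false := by simpa using hs
      simp only [hsb, Bool.false_eq_true, if_false]
      by_cases hq : c = '?'
      · subst hq
        have e2 : (('?':Char) == '?') = true := by decide
        have e3 : PySem.Chars.isdigit '?' = false := by decide
        simp only [e2, e3, if_true, Bool.false_eq_true, if_false, List.singleton_append]
        rw [ih (cnt + 1) (by omega)]
        have : (cnt + 1).toNat = cnt.toNat + 1 := by omega
        rw [this, List.replicate_succ']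
        simp
      · have hqb : (c == '?') = false := by simpa using hq
        simp only [hqb, Bool.false_eq_true, if_false]
        by_cases hd : PySem.Chars.isdigit c = true
        · have hv := digit_val_nonneg c hd
          simp only [hd, if_true]
          have hcount : (cnt + (PySem.Int.ofChars? [c]).getD 0).toNat
              = cnt.toNat + ((PySem.Int.ofChars? [c]).getD 0).toNat := by omega
          rw [ih _ (by omega), hcount, List.replicate_add, List.append_assoc]
        · have hdb : PySem.Chars.isdigit c = false := by simpa using hd
          simp only [hdb, Bool.false_eq_true, if_false, List.singleton_append]
          rw [compress_rep_cons _ _ hq, flush_toNat _ h, ih 0 le_rfl]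
          simp

-- ===== VERDICT =====
theorem to_standard_fen_py_spec : Claim_equal_to_standard_fen_py := by
  intro fen _
  unfold Spec_to_standard_fen_py to_standard_fen_py to_standard_fen_py_alt
  simp only
  rw [foldA_eq, pvG_eq _ 0 le_rfl]
  rfl
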